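-- pv_equiv track=rewrite | github.com/volcengine/verl | atropos/environments/intern_bootcamp/internbootcamp_lib/internbootcamp/bootcamp/cgeometricprogression/cgeometricprogression.py | geometric
-- ===== SOURCE A (Python) =====
-- from collections import defaultdict
--
-- def geometric(k, lst):
--     d = defaultdict(int)
--     total = 0
--     for num in lst:
--         if k != 0 and num % k == 0:
--             total += d.get((num // k, 2), 0)
--             d[(num, 2)] += d.get((num // k, 1), 0)
--         d[(num, 1)] += 1
--     return total
-- ===== SOURCE B (Python) =====
-- def geometric(k, lst):
--     # Count length-3 geometric subsequences by their MIDDLE element: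
--     # left = counts of elements strictly before the middle,
--     # right = counts of elements strictly after it.
--     right = {}
--     for num in lst:
--         right[num] = right.get(num, 0) + 1
--     left = {}
--     total = 0
--     for num in lst:
--         right[num] -= 1
--         if k != 0 and num % k == 0:
--             total += left.get(num // k, 0) * right.get(num * k, 0)
--         left[num] = left.get(num, 0) + 1
--     return total
-- ===== Notes on version B (the rewrite author's own statement) =====
-- stated objective: alternative
-- what changed: Counts triples by their middle element with left/right occurrence counters built in two passes, instead of A's single forward pass accumulating (value,length) pair counts in one dict.
import Mathlib
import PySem

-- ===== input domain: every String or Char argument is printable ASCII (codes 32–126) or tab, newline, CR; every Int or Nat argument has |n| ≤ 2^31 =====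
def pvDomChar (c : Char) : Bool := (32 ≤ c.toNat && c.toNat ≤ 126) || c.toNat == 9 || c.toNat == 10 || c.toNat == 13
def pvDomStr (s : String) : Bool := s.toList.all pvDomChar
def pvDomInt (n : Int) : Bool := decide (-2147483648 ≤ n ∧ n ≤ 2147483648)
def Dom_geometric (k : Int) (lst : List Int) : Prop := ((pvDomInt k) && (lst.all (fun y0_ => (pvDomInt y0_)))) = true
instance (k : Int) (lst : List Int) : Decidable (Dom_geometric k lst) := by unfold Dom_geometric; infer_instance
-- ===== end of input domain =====

-- B counts the length-3 geometric subsequences by their middle element with left/right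
-- occurrence counters built in two passes (alternative decomposition; same return value).


-- ===== PORT A =====
-- state: (d, total); d is the defaultdict(int) with keys (value, 1|2)
def stepA (k : Int) (st : PySem.Dict (Int × Int) Int × Int) (num : Int) :
    PySem.Dict (Int × Int) Int × Int :=
  let d := st.1
  let total := st.2
  let (d, total) :=
    if k ≠ 0 ∧ PySem.Int.mod num k = 0 then
      let total := total + d.getD (PySem.Int.floordiv num k, 2) 0
      let d := d.insert (num, 2) (d.getD (num, 2) 0 + d.getD (PySem.Int.floordiv num k, 1) 0)
      (d, total)
    else (d, total)
  (d.insert (num, 1) (d.getD (num, 1) 0 + 1), total)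

def geometric (k : Int) (lst : List Int) : Int :=
  (lst.foldl (stepA k) (PySem.Dict.empty, 0)).2

-- ===== PORT B =====
-- state: (left, right, total)
def stepB (k : Int) (st : PySem.Dict Int Int × PySem.Dict Int Int × Int) (num : Int) :
    PySem.Dict Int Int × PySem.Dict Int Int × Int :=
  let left := st.1
  let right := st.2.1
  let total := st.2.2
  -- right[num] -= 1  (the key is always present: num is drawn from lst)
  let right := right.insert num (right.getD num 0 - 1)
  let total :=
    if k ≠ 0 ∧ PySem.Int.mod num k = 0 then
      total + left.getD (PySem.Int.floordiv num k) 0 * right.getD (num * k) 0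
    else total
  (left.insert num (left.getD num 0 + 1), right, total)

def geometric_alt (k : Int) (lst : List Int) : Int :=
  let right := lst.foldl (fun (d : PySem.Dict Int Int) num => d.insert num (d.getD num 0 + 1))
    PySem.Dict.empty
  (lst.foldl (stepB k) (PySem.Dict.empty, right, 0)).2.2

-- ===== PRECONDITION & SPEC =====
def Spec_geometric (k : Int) (lst : List Int) (out : Int) : Prop := out = geometric_alt k lst
instance (k : Int) (lst : List Int) (out : Int) : Decidable (Spec_geometric k lst out) := by unfold Spec_geometric; infer_instance

-- ===== CLAIM (what is proved, stated in full; the proofs are below) =====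
def Claim_equal_geometric : Prop := ∀ (k : Int) (lst : List Int), Dom_geometric k lst → Spec_geometric k lst (geometric k lst)

-- ===== LEMMAS AND PROOFS =====

-- occurrence count, as an Int
def cntI (x : Int) (p : List Int) : Int := (p.count x : Int)

-- # pairs (i < j) in p with p_j = x and p_i * k = x (0 when k = 0)
def Pp (k : Int) : List Int → Int → Int
  | [], _ => 0
  | a :: p, x => (if k ≠ 0 ∧ a * k = x then cntI x p else 0) + Pp k p x

-- # pairs (j < l) in p with p_j = a * k and p_l = p_j * k (0 when k = 0)
def Qq (k : Int) : List Int → Int → Int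
  | [], _ => 0
  | b :: p, a => (if k ≠ 0 ∧ b = a * k then cntI (a * k * k) p else 0) + Qq k p a

-- # geometric triples inside p (0 when k = 0)
def Tt (k : Int) : List Int → Int
  | [] => 0
  | a :: p => Qq k p a + Tt k p

-- # pairs (i < j) in p with p_j = p_i * k, times occurrences of p_j * k in s
def Mm (k : Int) : List Int → List Int → Int
  | [], _ => 0
  | a :: p, s => (if k ≠ 0 then cntI (a * k) p * cntI (a * k * k) s else 0) + Mm k p s

theorem cntI_nil (x : Int) : cntI x [] = 0 := rfl

theorem cntI_cons (x a : Int) (p : List Int) :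
    cntI x (a :: p) = (if a = x then 1 else 0) + cntI x p := by
  by_cases h : a = x
  · simp [cntI, h]
    ring
  · simp [cntI, h]

theorem cntI_snoc (x b : Int) (p : List Int) :
    cntI x (p ++ [b]) = cntI x p + (if b = x then 1 else 0) := by
  by_cases h : b = x <;> simp [cntI, List.count_append, h]

-- generic if-manipulation helpers (all values Int, default 0)
theorem if_and_collapse {P Q : Prop} [Decidable P] [Decidable Q] (a : Int) :
    (if P then (if Q then a else 0) else 0) = if P ∧ Q then a else 0 := by
  by_cases hP : P <;> by_cases hQ : Q <;> simp [hP, hQ]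

theorem if_add_split {P : Prop} [Decidable P] (a b : Int) :
    (if P then a + b else 0) = (if P then a else 0) + (if P then b else 0) := by
  by_cases hP : P <;> simp [hP]

theorem if_congr_iff {P Q : Prop} [Decidable P] [Decidable Q] (a b : Int)
    (h : P ↔ Q) (hv : P → a = b) : (if P then a else 0) = (if Q then b else 0) := by
  by_cases hP : P
  · rw [if_pos hP, if_pos (h.1 hP), hv hP]
  · rw [if_neg hP, if_neg (fun hQ => hP (h.2 hQ))]

-- exact division facts
theorem dvd_quot_of_mul (k a b : Int) (hk : k ≠ 0) (h : a * k = b) : k ∣ b ∧ b / k = a := by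
  refine ⟨⟨a, by rw [← h]; ring⟩, ?_⟩
  rw [← h]
  exact Int.mul_ediv_cancel a hk

theorem mul_of_dvd_quot (k a b : Int) (h : k ∣ b) (hq : a = b / k) : a * k = b := by
  rw [hq]; exact Int.ediv_mul_cancel h

theorem mod_zero_iff (num k : Int) : PySem.Int.mod num k = 0 ↔ k ∣ num :=
  PySem.Int.mod_eq_zero_iff_dvd num k

theorem floordiv_of_dvd (num k : Int) (hk : k ≠ 0) (h : k ∣ num) :
    PySem.Int.floordiv num k = num / k := by
  have h1 := PySem.Int.floordiv_mul_add_mod num k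
  have hm : PySem.Int.mod num k = 0 := (mod_zero_iff num k).2 h
  have h2 : num / k * k = num := Int.ediv_mul_cancel h
  rw [hm] at h1
  have h3 : PySem.Int.floordiv num k * k = num / k * k := by linarith
  exact mul_right_cancel₀ hk h3

theorem Pp_snoc (k : Int) (p : List Int) (b x : Int) :
    Pp k (p ++ [b]) x = Pp k p x +
      (if k ≠ 0 ∧ k ∣ b ∧ x = b then cntI (b / k) p else 0) := by
  induction p with
  | nil => simp [Pp, cntI_nil]
  | cons a p ih =>
    simp only [List.cons_append, Pp, ih, cntI_snoc, cntI_cons]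
    rw [if_add_split, if_add_split, if_and_collapse, if_and_collapse]
    have key : (if (k ≠ 0 ∧ a * k = x) ∧ b = x then (1:Int) else 0)
        = (if (k ≠ 0 ∧ k ∣ b ∧ x = b) ∧ a = b / k then (1:Int) else 0) := by
      refine if_congr_iff 1 1 ?_ (fun _ => rfl)
      constructor
      · rintro ⟨⟨hk, hx⟩, hb⟩
        obtain ⟨hd, hq⟩ := dvd_quot_of_mul k a b hk (hx.trans hb.symm)
        exact ⟨⟨hk, hd, hb.symm⟩, hq.symm⟩
      · rintro ⟨⟨hk, hd, hxb⟩, ha⟩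
        have hab := mul_of_dvd_quot k a b hd ha
        exact ⟨⟨hk, hab.trans hxb.symm⟩, hxb.symm⟩
    rw [key]
    ring

theorem Qq_snoc (k : Int) (p : List Int) (b a : Int) :
    Qq k (p ++ [b]) a = Qq k p a +
      (if k ≠ 0 ∧ b = a * k * k then cntI (a * k) p else 0) := by
  induction p with
  | nil => simp [Qq, cntI_nil]
  | cons c p ih =>
    simp only [List.cons_append, Qq, ih, cntI_snoc, cntI_cons]
    rw [if_add_split, if_add_split, if_and_collapse, if_and_collapse]
    have key : (if (k ≠ 0 ∧ c = a * k) ∧ b = a * k * k then (1:Int) else 0)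
        = (if (k ≠ 0 ∧ b = a * k * k) ∧ c = a * k then (1:Int) else 0) := by
      refine if_congr_iff 1 1 ?_ (fun _ => rfl)
      tauto
    rw [key]
    ring

theorem Tt_snoc (k : Int) (p : List Int) (b : Int) :
    Tt k (p ++ [b]) = Tt k p + (if k ≠ 0 ∧ k ∣ b then Pp k p (b / k) else 0) := by
  induction p with
  | nil => simp [Tt, Qq, Pp]
  | cons a p ih =>
    simp only [List.cons_append, Tt, ih, Qq_snoc, Pp]
    rw [if_add_split, if_and_collapse]
    have key : (if k ≠ 0 ∧ b = a * k * k then cntI (a * k) p else 0)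
        = (if (k ≠ 0 ∧ k ∣ b) ∧ (k ≠ 0 ∧ a * k = b / k) then cntI (b / k) p else 0) := by
      refine if_congr_iff _ _ ?_ ?_
      · constructor
        · rintro ⟨hk, hb⟩
          obtain ⟨hd, hq⟩ := dvd_quot_of_mul k (a * k) b hk (by rw [hb])
          exact ⟨⟨hk, hd⟩, ⟨hk, hq.symm⟩⟩
        · rintro ⟨⟨hk, hd⟩, ⟨_, hq⟩⟩
          have := mul_of_dvd_quot k (a * k) b hd hq
          exact ⟨hk, by rw [← this]⟩
      · rintro ⟨hk, hb⟩
        obtain ⟨_, hq⟩ := dvd_quot_of_mul k (a * k) b hk (by rw [hb])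
        rw [hq]
    rw [key]
    ring

theorem Mm_nil_right (k : Int) (p : List Int) : Mm k p [] = 0 := by
  induction p with
  | nil => rfl
  | cons a p ih => simp [Mm, ih, cntI_nil]

theorem Mm_snoc (k : Int) (p : List Int) (b : Int) (s : List Int) :
    Mm k (p ++ [b]) s = Mm k p s +
      (if k ≠ 0 ∧ k ∣ b then cntI (b / k) p * cntI (b * k) s else 0) := by
  induction p with
  | nil => simp [Mm, cntI_nil]
  | cons a p ih =>
    simp only [List.cons_append, Mm, ih, cntI_snoc, cntI_cons]
    have expandL : (cntI (a * k) p + (if b = a * k then (1:Int) else 0)) * cntI (a * k * k) s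
        = cntI (a * k) p * cntI (a * k * k) s + (if b = a * k then cntI (a * k * k) s else 0) := by
      split_ifs <;> ring
    have expandR : ((if a = b / k then (1:Int) else 0) + cntI (b / k) p) * cntI (b * k) s
        = (if a = b / k then cntI (b * k) s else 0) + cntI (b / k) p * cntI (b * k) s := by
      split_ifs <;> ring
    rw [expandL, expandR, if_add_split, if_add_split, if_and_collapse, if_and_collapse]
    have key : (if k ≠ 0 ∧ b = a * k then cntI (a * k * k) s else 0)
        = (if (k ≠ 0 ∧ k ∣ b) ∧ a = b / k then cntI (b * k) s else 0) := by
      refine if_congr_iff _ _ ?_ ?_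
      · constructor
        · rintro ⟨hk, hb⟩
          obtain ⟨hd, hq⟩ := dvd_quot_of_mul k a b hk hb.symm
          exact ⟨⟨hk, hd⟩, hq.symm⟩
        · rintro ⟨⟨hk, hd⟩, ha⟩
          exact ⟨hk, (mul_of_dvd_quot k a b hd ha).symm⟩
      · rintro ⟨hk, hb⟩
        rw [hb]
    rw [key]
    ring

theorem Mm_cons_right (k : Int) (p : List Int) (c : Int) (s : List Int) :
    Mm k p (c :: s) = Mm k p s + (if k ≠ 0 ∧ k ∣ c then Pp k p (c / k) else 0) := by
  induction p with
  | nil => simp [Mm, Pp]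
  | cons a p ih =>
    simp only [Mm, ih, cntI_cons, Pp]
    have expandL : cntI (a * k) p * ((if c = a * k * k then (1:Int) else 0) + cntI (a * k * k) s)
        = (if c = a * k * k then cntI (a * k) p else 0) + cntI (a * k) p * cntI (a * k * k) s := by
      split_ifs <;> ring
    rw [expandL, if_add_split, if_add_split, if_and_collapse, if_and_collapse]
    have key : (if k ≠ 0 ∧ c = a * k * k then cntI (a * k) p else 0)
        = (if (k ≠ 0 ∧ k ∣ c) ∧ (k ≠ 0 ∧ a * k = c / k) then cntI (c / k) p else 0) := by
      refine if_congr_iff _ _ ?_ ?_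
      · constructor
        · rintro ⟨hk, hc⟩
          obtain ⟨hd, hq⟩ := dvd_quot_of_mul k (a * k) c hk (by rw [hc])
          exact ⟨⟨hk, hd⟩, ⟨hk, hq.symm⟩⟩
        · rintro ⟨⟨hk, hd⟩, ⟨_, hq⟩⟩
          have := mul_of_dvd_quot k (a * k) c hd hq
          exact ⟨hk, by rw [← this]⟩
      · rintro ⟨hk, hc⟩
        obtain ⟨_, hq⟩ := dvd_quot_of_mul k (a * k) c hk (by rw [hc])
        rw [hq]
    rw [key]
    ring

-- ----- the A-side invariant -----
theorem foldA (k : Int) (s : List Int) :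
    ∀ (p : List Int) (d : PySem.Dict (Int × Int) Int) (total : Int),
      (∀ x, d.getD (x, 1) 0 = cntI x p) →
      (∀ x, d.getD (x, 2) 0 = Pp k p x) →
      total = Tt k p →
      (s.foldl (stepA k) (d, total)).2 = Tt k (p ++ s) := by
  induction s with
  | nil => intro p d total _ _ ht; simpa using ht
  | cons num s ih =>
    intro p d total h1 h2 ht
    rw [List.foldl_cons]
    have hres : (p ++ num :: s) = (p ++ [num]) ++ s := by simp
    rw [hres]
    by_cases hg : k ≠ 0 ∧ PySem.Int.mod num k = 0
    · have hdvd : k ∣ num := (mod_zero_iff num k).1 hg.2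
      have hq : PySem.Int.floordiv num k = num / k := floordiv_of_dvd num k hg.1 hdvd
      have hstep : stepA k (d, total) num =
          ((d.insert (num, 2) (d.getD (num, 2) 0 + d.getD (PySem.Int.floordiv num k, 1) 0)).insert (num, 1)
            ((d.insert (num, 2) (d.getD (num, 2) 0 + d.getD (PySem.Int.floordiv num k, 1) 0)).getD (num, 1) 0 + 1),
           total + d.getD (PySem.Int.floordiv num k, 2) 0) := by
        simp [stepA, hg]
      rw [hstep]
      have hne21 : ∀ (y z : Int), ((y, 1) : Int × Int) ≠ (z, 2) := by
        intro y z h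
        simp [Prod.ext_iff] at h
      apply ih (p ++ [num])
      · intro x
        rw [PySem.Dict.getD_insert, cntI_snoc]
        by_cases e : x = num
        · subst e
          rw [if_pos rfl,
            PySem.Dict.getD_insert_of_ne _ _ _ (hne21 x x), h1, if_pos rfl]
        · have e' : ((x, 1) : Int × Int) ≠ (num, 1) := by
            simp [Prod.ext_iff, e]
          have e'' : ¬ num = x := fun h => e h.symm
          rw [if_neg e', PySem.Dict.getD_insert_of_ne _ _ _ (hne21 x num), h1, if_neg e'',
            add_zero]
      · intro x
        rw [PySem.Dict.getD_insert_of_ne _ _ _ (fun h => hne21 num x h.symm),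
          PySem.Dict.getD_insert, Pp_snoc]
        by_cases e : x = num
        · subst e
          rw [if_pos rfl, if_pos ⟨hg.1, hdvd, rfl⟩, hq, h1, h2]
        · have e' : ((x, 2) : Int × Int) ≠ (num, 2) := by
            simp [Prod.ext_iff, e]
          have e'' : ¬ (k ≠ 0 ∧ k ∣ num ∧ x = num) := fun h => e h.2.2
          rw [if_neg e', if_neg e'', h2, add_zero]
      · rw [hq, h2, Tt_snoc, ht, if_pos ⟨hg.1, hdvd⟩]
    · have hstep : stepA k (d, total) num =
          (d.insert (num, 1) (d.getD (num, 1) 0 + 1), total) := by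
        simp only [stepA]
        rw [if_neg hg]
      rw [hstep]
      have hng : ¬ (k ≠ 0 ∧ k ∣ num) := by
        intro h; exact hg ⟨h.1, (mod_zero_iff num k).2 h.2⟩
      apply ih (p ++ [num])
      · intro x
        rw [PySem.Dict.getD_insert, cntI_snoc]
        by_cases e : x = num
        · subst e
          rw [if_pos rfl, h1, if_pos rfl]
        · have e' : ((x, 1) : Int × Int) ≠ (num, 1) := by
            simp [Prod.ext_iff, e]
          have e'' : ¬ num = x := fun h => e h.symm
          rw [if_neg e', h1, if_neg e'', add_zero]
      · intro x
        have e' : ((x, 2) : Int × Int) ≠ (num, 1) := by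
          simp [Prod.ext_iff]
        have hng' : ¬ (k ≠ 0 ∧ k ∣ num ∧ x = num) := fun h => hng ⟨h.1, h.2.1⟩
        rw [PySem.Dict.getD_insert_of_ne _ _ _ e', Pp_snoc, if_neg hng', h2, add_zero]
      · rw [Tt_snoc, ht, if_neg hng, add_zero]

-- ----- the B-side invariant -----
theorem foldB (k : Int) (s : List Int) :
    ∀ (p : List Int) (left right : PySem.Dict Int Int) (total : Int),
      (∀ x, left.getD x 0 = cntI x p) →
      (∀ x, right.getD x 0 = cntI x s) →
      total = Tt k p + Mm k p s →
      (s.foldl (stepB k) (left, right, total)).2.2 = Tt k (p ++ s) := by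
  induction s with
  | nil =>
    intro p left right total _ _ ht
    simpa [Mm_nil_right] using ht
  | cons num s ih =>
    intro p left right total h1 h2 ht
    rw [List.foldl_cons]
    have hres : (p ++ num :: s) = (p ++ [num]) ++ s := by simp
    rw [hres]
    have hr' : ∀ x, (right.insert num (right.getD num 0 - 1)).getD x 0 = cntI x s := by
      intro x
      rw [PySem.Dict.getD_insert]
      split_ifs with e
      · subst e; rw [h2, cntI_cons]; simp
      · rw [h2, cntI_cons]
        have hne : ¬ num = x := fun h => e h.symm
        simp [hne]
    have hstep : stepB k (left, right, total) num =
        (left.insert num (left.getD num 0 + 1),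
         right.insert num (right.getD num 0 - 1),
         if k ≠ 0 ∧ PySem.Int.mod num k = 0 then
           total + left.getD (PySem.Int.floordiv num k) 0 *
             (right.insert num (right.getD num 0 - 1)).getD (num * k) 0
         else total) := rfl
    rw [hstep]
    apply ih (p ++ [num])
    · intro x
      rw [PySem.Dict.getD_insert, cntI_snoc]
      by_cases e : x = num
      · subst e
        rw [if_pos rfl, h1, if_pos rfl]
      · have e'' : ¬ num = x := fun h => e h.symm
        rw [if_neg e, h1, if_neg e'', add_zero]
    · exact hr'
    · rw [Tt_snoc, Mm_snoc, ht, Mm_cons_right]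
      by_cases hg : k ≠ 0 ∧ PySem.Int.mod num k = 0
      · have hdvd : k ∣ num := (mod_zero_iff num k).1 hg.2
        have hq : PySem.Int.floordiv num k = num / k := floordiv_of_dvd num k hg.1 hdvd
        have hgd : k ≠ 0 ∧ k ∣ num := ⟨hg.1, hdvd⟩
        rw [if_pos hg, hq, h1, hr', if_pos hgd, if_pos hgd]
        ring
      · have hng : ¬ (k ≠ 0 ∧ k ∣ num) := by
          intro h; exact hg ⟨h.1, (mod_zero_iff num k).2 h.2⟩
        rw [if_neg hg, if_neg hng, if_neg hng]
        ring

theorem counter_getD (s : List Int) (d : PySem.Dict Int Int) (x : Int) :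
    (s.foldl (fun (d : PySem.Dict Int Int) num => d.insert num (d.getD num 0 + 1)) d).getD x 0
      = d.getD x 0 + cntI x s := by
  rw [PySem.Dict.getD_foldl_insert_add_one]
  simp [cntI]

-- ===== VERDICT (by name: the statement is the Claim_ definition above) =====
theorem geometric_spec : Claim_equal_geometric := by
  intro k lst _
  unfold Spec_geometric geometric geometric_alt
  rw [foldA k lst [] PySem.Dict.empty 0
      (fun x => by simp [PySem.Dict.getD_empty, cntI_nil])
      (fun x => by simp [PySem.Dict.getD_empty, Pp])
      (by simp [Tt])]
  rw [foldB k lst [] PySem.Dict.empty _ 0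
      (fun x => by simp [PySem.Dict.getD_empty, cntI_nil])
      (fun x => by rw [counter_getD]; simp [PySem.Dict.getD_empty])
      (by simp [Tt, Mm])]
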